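-- pv_equiv track=rewrite | github.com/greenstar1151/kmucs-operating-systems | simulators/cache_strategy/main.py | simulate_opt
-- ===== SOURCE A (Python) =====
-- def simulate_opt(
--     pages: list[int], cache_size: int
-- ) -> tuple[list[list[int]], list[str]]:
--     cache: list[int] = []
--     history: list[list[int]] = []
--     replaced: list[str] = []
--     for i, p in enumerate(pages):
--         rep = "-"
--         if p not in cache:
--             if len(cache) < cache_size:
--                 cache.append(p)
--             else:
--                 # OPT: 앞으로 가장 늦게 쓰일 페이지를 교체
--                 future = pages[i + 1 :]
--                 idxs = [
--                     (future.index(x) if x in future else float("inf")) for x in cache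
--                 ]
--                 to_replace = idxs.index(max(idxs))
--                 rep = str(cache[to_replace])
--                 cache[to_replace] = p
--         history.append(list(cache))
--         replaced.append(rep)
--     return history, replaced
-- ===== SOURCE B (Python) =====
-- def _bisect_right(a: list[int], x: int) -> int:
--     # first index in sorted a whose element is > x
--     lo, hi = 0, len(a)
--     while lo < hi:
--         mid = (lo + hi) // 2
--         if a[mid] <= x:
--             lo = mid + 1
--         else:
--             hi = mid
--     return lo
--
--
-- def simulate_opt(
--     pages: list[int], cache_size: int
-- ) -> tuple[list[list[int]], list[str]]:
--     n = len(pages)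
--     # one pass: occurrence indices of every page, in increasing order
--     occ: dict[int, list[int]] = {}
--     for j, q in enumerate(pages):
--         occ.setdefault(q, []).append(j)
--
--     def next_use(x: int, i: int) -> int:
--         # first occurrence of x strictly after i; n acts as "never again"
--         lst = occ.get(x, [])
--         k = _bisect_right(lst, i)
--         return lst[k] if k < len(lst) else n
--
--     cache: list[int] = []
--     history: list[list[int]] = []
--     replaced: list[str] = []
--     for i, p in enumerate(pages):
--         rep = "-"
--         if p not in cache:
--             if len(cache) < cache_size:
--                 cache.append(p)
--             else:
--                 keys = [next_use(x, i) for x in cache]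
--                 victim = keys.index(max(keys))
--                 rep = str(cache[victim])
--                 cache[victim] = p
--         history.append(list(cache))
--         replaced.append(rep)
--     return history, replaced
-- ===== Notes on version B (the rewrite author's own statement) =====
-- stated objective: faster
-- what changed: Instead of slicing pages[i+1:] and linearly scanning it with future.index for every cached page at every miss, B precomputes one dict of sorted occurrence-index lists per page and finds each cached page's next use with a binary search, keeping ints (len(pages) as 'never used again') in place of float('inf').
import Mathlib
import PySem

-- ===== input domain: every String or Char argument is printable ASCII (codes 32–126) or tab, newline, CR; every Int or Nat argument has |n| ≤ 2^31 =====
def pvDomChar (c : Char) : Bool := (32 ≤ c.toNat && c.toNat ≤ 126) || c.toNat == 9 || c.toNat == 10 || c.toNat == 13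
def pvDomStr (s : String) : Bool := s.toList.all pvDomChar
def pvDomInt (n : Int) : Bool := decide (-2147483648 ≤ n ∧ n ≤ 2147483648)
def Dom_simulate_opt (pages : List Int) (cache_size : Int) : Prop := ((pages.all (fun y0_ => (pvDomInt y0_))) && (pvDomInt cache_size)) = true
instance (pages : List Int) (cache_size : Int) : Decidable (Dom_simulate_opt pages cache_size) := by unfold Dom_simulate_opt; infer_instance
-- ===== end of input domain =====

-- B replaces A's per-miss future slice + linear future.index scans by a precomputed
-- dict of per-page occurrence-index lists queried with a hand-written binary search
-- (measured faster on the generated inputs).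

-- ===== PORT A =====
-- 'b > a' for A's idxs entries: none stands for float('inf'), which exceeds every index
def pvOptGt (b a : Option Nat) : Bool :=
  match b, a with
  | none, some _ => true
  | some r', some r => decide (r < r')
  | _, _ => false

-- Python's max over idxs (keeps the first maximal element); max([]) raises ValueError
-- in Python (reached only when cache is empty, excluded by Pre_), here it returns none
def pvPyMaxInf : List (Option Nat) → Option Nat
  | [] => none
  | h :: t => t.foldl (fun m v => if pvOptGt v m then v else m) h

-- the body of A's 'for i, p in enumerate(pages)' loop; state = (cache, history, replaced)
def pvAStep (pages : List Int) (cache_size : Int)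
    (st : List Int × List (List Int) × List String) (ip : Int × Int) :
    List Int × List (List Int) × List String :=
  let cache := st.1
  if cache.contains ip.2 then (cache, st.2.1 ++ [cache], st.2.2 ++ ["-"])
  else if (PySem.List.len cache) < cache_size then
    (cache ++ [ip.2], st.2.1 ++ [cache ++ [ip.2]], st.2.2 ++ ["-"])
  else
    let future := PySem.List.slice pages (some (ip.1 + 1)) none
    let idxs := cache.map (fun x => PySem.List.index? future x)   -- none = float('inf')
    let to_replace := idxs.idxOf (pvPyMaxInf idxs)
    let rep := PySem.Int.toStr (cache.getD to_replace 0)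
    let cache2 := cache.set to_replace ip.2
    (cache2, st.2.1 ++ [cache2], st.2.2 ++ [rep])

def simulate_opt (pages : List Int) (cache_size : Int) : List (List Int) × List String :=
  ((PySem.List.enumerate pages 0).foldl (pvAStep pages cache_size) ([], [], [])).2

-- ===== PORT B =====
-- hand-written _bisect_right of Source B (a[mid] is always in range there, so getD is exact)
def pvBisectRight (a : List Int) (x : Int) (lo hi : Nat) : Nat :=
  if h : lo < hi then
    if a.getD ((lo + hi) / 2) 0 ≤ x then pvBisectRight a x ((lo + hi) / 2 + 1) hi
    else pvBisectRight a x lo ((lo + hi) / 2)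
  else lo
termination_by hi - lo
decreasing_by all_goals omega

-- next_use(x, i): first occurrence of x strictly after i, or n
def pvNextUse (occ : PySem.Dict Int (List Int)) (n : Int) (x i : Int) : Int :=
  let lst := occ.getD x []
  let k := pvBisectRight lst i 0 lst.length
  if k < lst.length then lst.getD k 0 else n

-- the body of B's main loop
def pvBStep (occ : PySem.Dict Int (List Int)) (n : Int) (cache_size : Int)
    (st : List Int × List (List Int) × List String) (ip : Int × Int) :
    List Int × List (List Int) × List String :=
  let cache := st.1
  if cache.contains ip.2 then (cache, st.2.1 ++ [cache], st.2.2 ++ ["-"])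
  else if (PySem.List.len cache) < cache_size then
    (cache ++ [ip.2], st.2.1 ++ [cache ++ [ip.2]], st.2.2 ++ ["-"])
  else
    let keys := cache.map (fun x => pvNextUse occ n x ip.1)
    -- keys.index(max(keys)); max([]) raises in Python (empty cache, excluded by Pre_)
    let victim := match PySem.List.max? keys (fun y => y) with
      | some m => keys.idxOf m
      | none => 0
    let rep := PySem.Int.toStr (cache.getD victim 0)
    let cache2 := cache.set victim ip.2
    (cache2, st.2.1 ++ [cache2], st.2.2 ++ [rep])

def simulate_opt_alt (pages : List Int) (cache_size : Int) : List (List Int) × List String :=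
  let n : Int := pages.length
  let occ := (PySem.List.enumerate pages 0).foldl
    (fun d jq => d.modify jq.2 [] (fun l => l ++ [jq.1])) PySem.Dict.empty
  ((PySem.List.enumerate pages 0).foldl (pvBStep occ n cache_size) ([], [], [])).2

-- ===== PRECONDITION & SPEC =====
-- Pre_ excludes exactly the inputs where the Python A raises: with a nonempty pages list
-- and cache_size ≤ 0 the first miss reaches max([]), which raises ValueError (B raises too).
def Pre_simulate_opt (pages : List Int) (cache_size : Int) : Prop :=
  pages = [] ∨ 1 ≤ cache_size
instance (pages : List Int) (cache_size : Int) : Decidable (Pre_simulate_opt pages cache_size) := by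
  unfold Pre_simulate_opt; infer_instance

def pvWitness_simulate_opt : List Int × Int := ([1, 2, 3, 1, 2], 2)

def Spec_simulate_opt (pages : List Int) (cache_size : Int) (out : List (List Int) × List String) : Prop := out = simulate_opt_alt pages cache_size
instance (pages : List Int) (cache_size : Int) (out : List (List Int) × List String) : Decidable (Spec_simulate_opt pages cache_size out) := by unfold Spec_simulate_opt; infer_instance

-- ===== CLAIM (what is proved, stated in full; the proofs are below) =====
def Claim_equal_simulate_opt : Prop := ∀ (pages : List Int) (cache_size : Int), Dom_simulate_opt pages cache_size → Pre_simulate_opt pages cache_size → Spec_simulate_opt pages cache_size (simulate_opt pages cache_size)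

-- ===== LEMMAS AND PROOFS =====

-- the order-embedding of A's idxs entries into B's keys at step i: relative index r
-- into the future ↦ absolute index i+1+r, float('inf') ↦ n
def pvF (i n : Int) : Option Nat → Int
  | none => n
  | some r => i + 1 + r

-- the values A's idxs can contain at step i: finite entries index into the future
def pvP (i n : Int) (v : Option Nat) : Prop := ∀ r : Nat, v = some r → i + 1 + (r : Int) < n

theorem pvGetD_mono (a : List Int) (hs : a.Pairwise (· ≤ ·)) (j k : Nat)
    (hjk : j ≤ k) (hk : k < a.length) : a.getD j 0 ≤ a.getD k 0 := by
  rcases Nat.lt_or_eq_of_le hjk with h | rfl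
  · rw [List.getD_eq_getElem a 0 (by omega), List.getD_eq_getElem a 0 hk]
    exact List.pairwise_iff_getElem.1 hs j k (by omega) hk h
  · exact le_refl _

theorem pvBisectRight_bounds (a : List Int) (x : Int) (hs : a.Pairwise (· ≤ ·)) :
    ∀ (d lo hi : Nat), hi - lo ≤ d → lo ≤ hi → hi ≤ a.length →
    (∀ j, j < lo → a.getD j 0 ≤ x) →
    (∀ j, hi ≤ j → j < a.length → x < a.getD j 0) →
    pvBisectRight a x lo hi ≤ a.length ∧
    (∀ j, j < pvBisectRight a x lo hi → a.getD j 0 ≤ x) ∧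
    (∀ j, pvBisectRight a x lo hi ≤ j → j < a.length → x < a.getD j 0) := by
  intro d
  induction d with
  | zero =>
    intro lo hi hd hle hlen h1 h2
    have : lo = hi := by omega
    subst this
    rw [pvBisectRight]
    simp only [lt_irrefl, dite_false]
    exact ⟨hlen, h1, h2⟩
  | succ d ih =>
    intro lo hi hd hle hlen h1 h2
    by_cases hlh : lo < hi
    · rw [pvBisectRight]
      rw [dif_pos hlh]
      have hmidlt : (lo + hi) / 2 < hi := by omega
      have hmidge : lo ≤ (lo + hi) / 2 := by omega
      split
      · next hmid =>
        exact ih ((lo + hi) / 2 + 1) hi (by omega) (by omega) hlen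
          (fun j hj => le_trans (pvGetD_mono a hs j ((lo+hi)/2) (by omega) (by omega)) hmid) h2
      · next hmid =>
        rw [not_le] at hmid
        exact ih lo ((lo + hi) / 2) (by omega) (by omega) (by omega) h1
          (fun j hj hjl => lt_of_lt_of_le hmid (pvGetD_mono a hs ((lo+hi)/2) j hj hjl))
    · rw [pvBisectRight]
      rw [dif_neg hlh]
      have : lo = hi := by omega
      subst this
      exact ⟨hlen, h1, h2⟩

theorem pvFind?_boundary (l : List Int) (p : Int → Bool) (r : Nat) (hr : r ≤ l.length)
    (h1 : ∀ j, j < r → p (l.getD j 0) = false)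
    (h2 : ∀ j, r ≤ j → j < l.length → p (l.getD j 0) = true) :
    l.find? p = l[r]? := by
  induction l generalizing r with
  | nil => simp
  | cons a t ih =>
    cases r with
    | zero =>
      have := h2 0 (le_refl _) (by simp)
      simp only [List.getD_cons_zero] at this
      simp [this]
    | succ r =>
      have ha := h1 0 (by omega)
      simp only [List.getD_cons_zero] at ha
      simp only [List.find?_cons, ha, List.getElem?_cons_succ]
      exact ih r (by simpa using hr)
        (fun j hj => by simpa using h1 (j+1) (by omega))
        (fun j hj hjl => by simpa using h2 (j+1) (by omega) (by simpa using hjl))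

theorem pvNextUse_eq (occ : PySem.Dict Int (List Int)) (n x i : Int)
    (hs : (occ.getD x []).Pairwise (· ≤ ·)) :
    pvNextUse occ n x i = ((occ.getD x []).find? (fun j => decide (i < j))).getD n := by
  set lst := occ.getD x [] with hlst
  obtain ⟨hr, hb1, hb2⟩ := pvBisectRight_bounds lst i hs lst.length 0 lst.length
    (by omega) (by omega) (le_refl _) (by omega) (by omega)
  set r := pvBisectRight lst i 0 lst.length with hrdef
  have hfind : lst.find? (fun j => decide (i < j)) = lst[r]? :=
    pvFind?_boundary lst _ r hr
      (fun j hj => by simpa using hb1 j hj)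
      (fun j hj hjl => by simpa using hb2 j hj hjl)
  rw [pvNextUse]
  simp only [← hlst, ← hrdef, hfind]
  by_cases hrl : r < lst.length
  · rw [if_pos hrl, List.getElem?_eq_getElem hrl, Option.getD_some, List.getD_eq_getElem _ _ hrl]
  · rw [if_neg hrl, List.getElem?_eq_none (by omega), Option.getD_none]

theorem pvOcc_getD (pages : List Int) (x : Int) :
    ((PySem.List.enumerate pages 0).foldl
      (fun d jq => d.modify jq.2 [] (fun l => l ++ [jq.1])) PySem.Dict.empty).getD x []
    = ((PySem.List.enumerate pages 0).filter (fun jq => jq.2 == x)).map (·.1) := by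
  have h : (PySem.List.enumerate pages 0).foldl
      (fun d jq => d.modify jq.2 [] (fun l => l ++ [jq.1])) PySem.Dict.empty
      = (((PySem.List.enumerate pages 0).map (fun jq => (jq.2, jq.1))).foldl
          (fun d p => d.modify p.1 [] (fun l => l ++ [p.2])) PySem.Dict.empty) := by
    rw [List.foldl_map]
  rw [h, PySem.Dict.getD_foldl_modify_append]
  simp [List.filter_map, List.map_map, Function.comp_def]

theorem pvOcc_sorted (pages : List Int) (x : Int) :
    (((PySem.List.enumerate pages 0).filter (fun jq => jq.2 == x)).map (·.1)).Pairwise (· ≤ ·) := by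
  have h := PySem.List.pairwise_lt_enumerate pages 0
  rw [List.pairwise_map]
  exact (h.filter _).imp (fun h => le_of_lt h)

theorem pvFindOcc (l : List Int) (x i : Int) :
    ∀ s : Int, (((PySem.List.enumerate l s).filter (fun jq => jq.2 == x)).map (·.1)).find?
        (fun j => decide (i < j))
      = (PySem.List.index? (l.drop (max s (i+1) - s).toNat) x).map
          (fun r => max s (i+1) + (r : Int)) := by
  induction l with
  | nil =>
    intro s
    simp [PySem.List.enumerate_nil, PySem.List.index?]
  | cons a t ih =>
    intro s
    rw [PySem.List.enumerate_cons]
    by_cases hsi : s ≤ i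
    · have hm : max s (i+1) = i + 1 := by omega
      have hm' : max (s+1) (i+1) = i + 1 := by omega
      have hk : (max s (i+1) - s).toNat = (max (s+1) (i+1) - (s+1)).toNat + 1 := by omega
      have hdrop : (a :: t).drop ((max s (i+1) - s).toNat)
          = t.drop ((max (s+1) (i+1) - (s+1)).toNat) := by
        rw [hk]; rfl
      by_cases hax : a = x
      · subst hax
        have hd : (decide (i < s)) = false := by simp; omega
        simp only [List.filter_cons, BEq.rfl, if_pos, List.map_cons, List.find?_cons, hd]
        rw [ih (s+1), hdrop, hm, hm']
      · have hbeq : (a == x) = false := by simpa using hax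
        simp only [List.filter_cons, hbeq, if_neg, Bool.false_eq_true, not_false_iff]
        rw [ih (s+1), hdrop, hm, hm']
    · have hm : max s (i+1) = s := by omega
      have hm' : max (s+1) (i+1) = s + 1 := by omega
      have hk0 : (max s (i+1) - s).toNat = 0 := by omega
      have hk0' : (max (s+1) (i+1) - (s+1)).toNat = 0 := by omega
      rw [hk0, List.drop_zero]
      by_cases hax : a = x
      · subst hax
        have hd : (decide (i < s)) = true := by simp; omega
        simp only [List.filter_cons, BEq.rfl, if_pos, List.map_cons, List.find?_cons, hd]
        rw [PySem.List.index?_cons_self]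
        simp [hm]
      · have hbeq : (a == x) = false := by simpa using hax
        simp only [List.filter_cons, hbeq, if_neg, Bool.false_eq_true, not_false_iff]
        rw [ih (s+1), hk0', List.drop_zero, hm, hm']
        rw [PySem.List.index?_cons_of_ne t hax]
        cases h : PySem.List.index? t x <;> simp
        omega

theorem pvFoldlMax_mem : ∀ (t : List (Option Nat)) (a : Option Nat),
    t.foldl (fun m v => if pvOptGt v m then v else m) a = a ∨
    t.foldl (fun m v => if pvOptGt v m then v else m) a ∈ t := by
  intro t
  induction t with
  | nil => intro a; left; rfl
  | cons v t ih =>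
    intro a
    rcases ih (if pvOptGt v a then v else a) with h | h
    · rw [List.foldl_cons, h]
      split
      · right; exact List.mem_cons_self
      · left; rfl
    · right
      rw [List.foldl_cons]
      exact List.mem_cons_of_mem _ h

theorem pvFoldlMax_map (i n : Int) : ∀ (t : List (Option Nat)) (a : Option Nat),
    pvP i n a → (∀ v ∈ t, pvP i n v) →
    (t.map (pvF i n)).foldl max (pvF i n a) =
      pvF i n (t.foldl (fun m v => if pvOptGt v m then v else m) a) := by
  intro t
  induction t with
  | nil => intro a _ _; rfl
  | cons v t ih =>
    intro a hPa hPt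
    have hPv : pvP i n v := hPt v List.mem_cons_self
    have hstep : max (pvF i n a) (pvF i n v) = pvF i n (if pvOptGt v a then v else a) := by
      cases a with
      | none =>
        cases v with
        | none => simp [pvOptGt, pvF]
        | some r =>
          have := hPv r rfl
          have hg : pvOptGt (some r) none = false := rfl
          rw [hg, if_neg (by simp)]
          simp only [pvF]
          omega
      | some r =>
        cases v with
        | none =>
          have := hPa r rfl
          have hg : pvOptGt none (some r) = true := rfl
          rw [hg, if_pos rfl]
          simp only [pvF]
          omega
        | some r' =>
          have hg : pvOptGt (some r') (some r) = decide (r < r') := rfl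
          rw [hg]
          by_cases hrr : r < r'
          · rw [if_pos (by simpa using hrr)]
            simp only [pvF]
            omega
          · rw [if_neg (by simpa using hrr)]
            simp only [pvF]
            omega
    have hPstep : pvP i n (if pvOptGt v a then v else a) := by
      split
      · exact hPv
      · exact hPa
    rw [List.map_cons, List.foldl_cons, List.foldl_cons, hstep]
    exact ih _ hPstep (fun w hw => hPt w (List.mem_cons_of_mem _ hw))

theorem pvIdxOf_map (f : Option Nat → Int) : ∀ (l : List (Option Nat)) (m : Option Nat),
    (∀ v ∈ l, f v = f m → v = m) → (l.map f).idxOf (f m) = l.idxOf m := by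
  intro l
  induction l with
  | nil => intro m _; rfl
  | cons a l ih =>
    intro m h
    rw [List.map_cons, List.idxOf_cons, List.idxOf_cons]
    by_cases ham : a = m
    · subst ham
      simp
    · have h1 : (a == m) = false := by simpa using ham
      have h2 : (f a == f m) = false := by
        simp only [beq_eq_false_iff_ne, ne_eq]
        intro hf
        exact ham (h a List.mem_cons_self hf)
      rw [h1, h2]
      simp only [cond_false]
      rw [ih m (fun v hv => h v (List.mem_cons_of_mem _ hv))]

theorem pvVictim_eq (i n : Int) (idxs : List (Option Nat)) (hP : ∀ v ∈ idxs, pvP i n v) :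
    (match PySem.List.max? (List.map (pvF i n) idxs) (fun y => y) with
      | some m => List.idxOf m (List.map (pvF i n) idxs)
      | none => 0) = List.idxOf (pvPyMaxInf idxs) idxs := by
  cases hcc : idxs with
  | nil =>
    subst hcc
    simp only [List.map_nil]
    split <;> rfl
  | cons i0 itl =>
    rw [← hcc]
    have hmem : pvPyMaxInf idxs ∈ idxs := by
      rw [hcc]
      show itl.foldl (fun m v => if pvOptGt v m then v else m) i0 ∈ i0 :: itl
      rcases pvFoldlMax_mem itl i0 with h | h
      · rw [h]; exact List.mem_cons_self
      · exact List.mem_cons_of_mem _ h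
    have hPm : pvP i n (pvPyMaxInf idxs) := hP _ hmem
    have hmax : PySem.List.max? (List.map (pvF i n) idxs) (fun y => y)
        = some (pvF i n (pvPyMaxInf idxs)) := by
      rw [hcc, List.map_cons, PySem.List.max?_id_cons]
      congr 1
      rw [pvFoldlMax_map i n itl i0 (hP i0 (hcc ▸ List.mem_cons_self))
        (fun v hv => hP v (hcc ▸ List.mem_cons_of_mem _ hv))]
      rfl
    rw [hmax]
    apply pvIdxOf_map (pvF i n) idxs (pvPyMaxInf idxs)
    intro v hv hfv
    have hPv := hP v hv
    cases v with
    | none =>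
      cases hm : pvPyMaxInf idxs with
      | none => rfl
      | some r =>
        exfalso
        have := hPm r hm
        rw [hm] at hfv
        simp only [pvF] at hfv
        omega
    | some r =>
      cases hm : pvPyMaxInf idxs with
      | none =>
        exfalso
        have := hPv r rfl
        rw [hm] at hfv
        simp only [pvF] at hfv
        omega
      | some r2 =>
        rw [hm] at hfv
        simp only [pvF] at hfv
        have : r = r2 := by omega
        rw [this]

theorem pvStep_eq (pages : List Int) (cache_size : Int)
    (st : List Int × List (List Int) × List String) (ip : Int × Int)
    (hip : ip ∈ PySem.List.enumerate pages 0) :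
    pvAStep pages cache_size st ip =
    pvBStep ((PySem.List.enumerate pages 0).foldl
        (fun d jq => d.modify jq.2 [] (fun l => l ++ [jq.1])) PySem.Dict.empty)
      (pages.length : Int) cache_size st ip := by
  obtain ⟨k, hk, rfl⟩ := (PySem.List.mem_enumerate_iff pages 0 ip).1 hip
  set i : Int := 0 + (k : Int) with hidef
  have hi0 : 0 ≤ i := by omega
  have hin : i < (pages.length : Int) := by omega
  set n : Int := (pages.length : Int) with hndef
  set occ := (PySem.List.enumerate pages 0).foldl
      (fun d jq => d.modify jq.2 [] (fun l => l ++ [jq.1])) PySem.Dict.empty with hocc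
  unfold pvAStep pvBStep
  dsimp only
  split_ifs with hc hlen
  · rfl
  · rfl
  · -- the miss-with-full-cache branch: show victim = to_replace
    have hfut : PySem.List.slice pages (some (i + 1)) none = pages.drop (i+1).toNat :=
      PySem.List.slice_from pages (by omega)
    have hx : ∀ x, pvNextUse occ n x i
        = pvF i n (PySem.List.index? (PySem.List.slice pages (some (i + 1)) none) x) := by
      intro x
      rw [pvNextUse_eq occ n x i (by rw [hocc, pvOcc_getD]; exact pvOcc_sorted pages x)]
      rw [hocc, pvOcc_getD, pvFindOcc pages x i 0]
      have hm : max (0:Int) (i+1) = i + 1 := by omega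
      rw [hfut, hm, sub_zero]
      cases h : PySem.List.index? (pages.drop (i+1).toNat) x <;> simp [pvF]
    have hkeys : List.map (fun x => pvNextUse occ n x i) st.1
        = List.map (pvF i n)
            (List.map (fun x => PySem.List.index? (PySem.List.slice pages (some (i + 1)) none) x) st.1) := by
      rw [List.map_map]
      exact List.map_congr_left (fun x _ => hx x)
    set idxs := List.map (fun x => PySem.List.index? (PySem.List.slice pages (some (i + 1)) none) x) st.1 with hidxs
    have hP : ∀ v ∈ idxs, pvP i n v := by
      intro v hv r hr
      subst hr
      obtain ⟨x, hxmem, hxeq⟩ := List.mem_map.1 hv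
      obtain ⟨hrlt, -, -⟩ := PySem.List.getElem_of_index?_eq_some hxeq
      rw [hfut, List.length_drop] at hrlt
      omega
    rw [hkeys, pvVictim_eq i n idxs hP]

-- ===== VERDICT (by name: the statement is the Claim_ definition above) =====
theorem simulate_opt_spec : Claim_equal_simulate_opt := by
  intro pages cache_size _ _
  unfold Spec_simulate_opt simulate_opt simulate_opt_alt
  exact congrArg Prod.snd (PySem.List.foldl_congr_mem _ _ _ _
    (fun st ip hip => pvStep_eq pages cache_size st ip hip))
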